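-- pv_equiv track=rewrite | github.com/rbenua/AdventOfCode | 2017/9/day9.py | part2
-- ===== SOURCE A (Python) =====
-- def part2(stream):
--     counting = False
--     canceled = False
--     total = 0
--     for c in stream:
--         if counting:
--             if canceled:
--                 canceled = False
--             elif c == '!':
--                 canceled = True
--             elif c == '>':
--                 counting = False
--             else:
--                 total += 1
--         elif canceled:
--             canceled = False
--         elif c == '!':
--             canceled = True
--         elif c == '<':
--             counting = True
--     return total
-- ===== SOURCE B (Python) =====
-- def part2(stream):
--     # pass 1: remove escape pairs ('!' plus the following character)
--     cleaned = []
--     skip = False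
--     for c in stream:
--         if skip:
--             skip = False
--         elif c == '!':
--             skip = True
--         else:
--             cleaned.append(c)
--     # pass 2: split on '<' and measure each garbage stretch with find('>')
--     chunks = ''.join(cleaned).split('<')
--     total = 0
--     garbage = False
--     for chunk in chunks[1:]:
--         if garbage:
--             total += 1  # this '<' was content of an open garbage group
--         j = chunk.find('>')
--         if j == -1:
--             total += len(chunk)
--             garbage = True
--         else:
--             total += j
--             garbage = False
--     return total
-- ===== Notes on version B (the rewrite author's own statement) =====
-- stated objective: alternative
-- what changed: B replaces A's one-pass two-flag state machine by two staged passes: first strip every escape pair, then split the cleaned text on the garbage-open delimiter and measure each garbage stretch with str.find of the close delimiter (whole chunk length when absent, plus one per delimiter hit inside open garbage).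
import Mathlib
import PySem

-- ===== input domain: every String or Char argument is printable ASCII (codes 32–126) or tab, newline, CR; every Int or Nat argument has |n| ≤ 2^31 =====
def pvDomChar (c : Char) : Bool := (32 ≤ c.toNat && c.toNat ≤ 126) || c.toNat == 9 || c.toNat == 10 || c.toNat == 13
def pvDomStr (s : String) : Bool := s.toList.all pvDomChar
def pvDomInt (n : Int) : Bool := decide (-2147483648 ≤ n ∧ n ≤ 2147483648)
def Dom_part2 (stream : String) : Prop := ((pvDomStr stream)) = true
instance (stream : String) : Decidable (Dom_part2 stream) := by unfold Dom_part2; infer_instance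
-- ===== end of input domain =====

-- B is staged: it first strips escape pairs, then splits the cleaned text on the
-- garbage-open delimiter and measures each stretch with a find of the close delimiter,
-- instead of A's one-pass two-flag state machine (alternative decomposition; return value only).

-- ===== PORT A =====
def part2Step (s : Bool × Bool × Int) (c : Char) : Bool × Bool × Int :=
  if s.1 then
    if s.2.1 then (s.1, false, s.2.2)
    else if c = '!' then (s.1, true, s.2.2)
    else if c = '>' then (false, s.2.1, s.2.2)
    else (s.1, s.2.1, s.2.2 + 1)
  else if s.2.1 then (s.1, false, s.2.2)
  else if c = '!' then (s.1, true, s.2.2)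
  else if c = '<' then (true, s.2.1, s.2.2)
  else s

def part2 (stream : String) : Int :=
  (stream.toList.foldl part2Step (false, false, 0)).2.2

-- ===== PORT B =====
-- pass 1 of Source B: drop '!' together with the character it escapes (skip flag)
def cleanGo (l : List Char) (skip : Bool) : List Char :=
  match l with
  | [] => []
  | c :: rest =>
    if skip then cleanGo rest false
    else if c = '!' then cleanGo rest true
    else c :: cleanGo rest false

-- hand port of Python str.split('<'): chunks between '<', empties kept
def pySplitLt (l : List Char) : List (List Char) :=
  match l with
  | [] => [[]]
  | c :: rest =>
    if c = '<' then [] :: pySplitLt rest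
    else
      match pySplitLt rest with
      | [] => [[c]]      -- unreachable: pySplitLt is never []
      | h :: t => (c :: h) :: t

-- hand port of Python str.find('>'): first index of '>', none for Python's -1
def pyFindGt (l : List Char) : Option Nat :=
  match l with
  | [] => none
  | c :: rest => if c = '>' then some 0 else (pyFindGt rest).map (· + 1)

-- pass 2 of Source B: the loop over chunks[1:]
def bGo (chunks : List (List Char)) (garbage : Bool) (total : Int) : Int :=
  match chunks with
  | [] => total
  | ch :: rest =>
    let t1 := if garbage then total + 1 else total
    match pyFindGt ch with
    | none => bGo rest true (t1 + ch.length)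
    | some j => bGo rest false (t1 + j)

def part2_alt (stream : String) : Int :=
  bGo ((pySplitLt (cleanGo stream.toList false)).drop 1) false 0

-- ===== PRECONDITION & SPEC =====
def Spec_part2 (stream : String) (out : Int) : Prop := out = part2_alt stream
instance (stream : String) (out : Int) : Decidable (Spec_part2 stream out) := by unfold Spec_part2; infer_instance

-- ===== CLAIM (what is proved, stated in full; the proofs are below) =====
def Claim_equal_part2 : Prop := ∀ (stream : String), Dom_part2 stream → Spec_part2 stream (part2 stream)

-- ===== LEMMAS AND PROOFS =====

-- escape-free single-flag machine: intermediate between A and B (proof-only)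
def sGo (l : List Char) (g : Bool) (t : Int) : Int :=
  match l with
  | [] => t
  | c :: rest =>
    if g then
      if c = '>' then sGo rest false t else sGo rest true (t + 1)
    else
      if c = '<' then sGo rest true t else sGo rest false t

-- B's chunk loop including the first chunk (proof-only packaging)
def evalChunks (chunks : List (List Char)) (g : Bool) (t : Int) : Int :=
  match chunks with
  | [] => t
  | ch :: rest =>
    if g then
      match pyFindGt ch with
      | none => bGo rest true (t + ch.length)
      | some j => bGo rest false (t + j)
    else bGo rest false t

lemma pySplitLt_ne_nil (l : List Char) : pySplitLt l ≠ [] := by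
  cases l with
  | nil => simp [pySplitLt]
  | cons c rest =>
    simp only [pySplitLt]
    split
    · simp
    · cases pySplitLt rest <;> simp

-- stage 2: the single-flag machine equals B's split/find computation
lemma sGo_eval (l : List Char) (g : Bool) (t : Int) :
    sGo l g t = evalChunks (pySplitLt l) g t := by
  induction l generalizing g t with
  | nil => cases g <;> simp [sGo, pySplitLt, evalChunks, pyFindGt, bGo]
  | cons c rest ih =>
    by_cases hc : c = '<'
    · subst hc
      have hne := pySplitLt_ne_nil rest
      obtain ⟨h, tl, hsp⟩ : ∃ h tl, pySplitLt rest = h :: tl := by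
        cases e : pySplitLt rest with
        | nil => exact absurd e hne
        | cons a b => exact ⟨a, b, rfl⟩
      have hsplit : pySplitLt ('<' :: rest) = [] :: h :: tl := by
        simp [pySplitLt, hsp]
      cases g with
      | false =>
        have L : sGo ('<' :: rest) false t = sGo rest true t := by simp [sGo]
        rw [L, ih true t, hsp, hsplit]
        cases hf : pyFindGt h <;> simp [evalChunks, bGo, hf]
      | true =>
        have L : sGo ('<' :: rest) true t = sGo rest true (t + 1) := by simp [sGo]
        rw [L, ih true (t + 1), hsp, hsplit]
        cases hf : pyFindGt h <;> simp [evalChunks, bGo, pyFindGt, hf]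
    · have hne := pySplitLt_ne_nil rest
      cases hsp : pySplitLt rest with
      | nil => exact absurd hsp hne
      | cons h tl =>
        have hsp' : pySplitLt (c :: rest) = (c :: h) :: tl := by
          simp [pySplitLt, hc, hsp]
        cases g with
        | false =>
          rw [show sGo (c :: rest) false t = sGo rest false t from by simp [sGo, hc],
            ih false t, hsp, hsp']
          simp [evalChunks]
        | true =>
          by_cases hgt : c = '>'
          · subst hgt
            rw [show sGo ('>' :: rest) true t = sGo rest false t from by simp [sGo],
              ih false t, hsp, hsp']
            simp [evalChunks, pyFindGt]
          · rw [show sGo (c :: rest) true t = sGo rest true (t + 1) from by simp [sGo, hgt],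
              ih true (t + 1), hsp, hsp']
            cases hf : pyFindGt h with
            | none =>
              have hf' : pyFindGt (c :: h) = none := by simp [pyFindGt, hgt, hf]
              simp only [evalChunks, hf, hf', List.length_cons]
              rw [if_pos trivial, if_pos trivial]
              congr 1; push_cast; ring
            | some j =>
              have hf' : pyFindGt (c :: h) = some (j + 1) := by simp [pyFindGt, hgt, hf]
              simp only [evalChunks, hf, hf']
              rw [if_pos trivial, if_pos trivial]
              congr 1; push_cast; ring

-- stage 1: A's two-flag machine equals the single-flag machine on the cleaned list
lemma part2_clean (l : List Char) (canc g : Bool) (t : Int) :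
    (l.foldl part2Step (g, canc, t)).2.2 = sGo (cleanGo l canc) g t := by
  induction l generalizing canc g t with
  | nil => simp [cleanGo, sGo]
  | cons c rest ih =>
    cases canc with
    | true =>
      have hstep : part2Step (g, true, t) c = (g, false, t) := by
        cases g <;> simp [part2Step]
      rw [List.foldl_cons, hstep, show cleanGo (c :: rest) true = cleanGo rest false
        from by simp [cleanGo]]
      exact ih false g t
    | false =>
      by_cases hb : c = '!'
      · subst hb
        have hstep : part2Step (g, false, t) '!' = (g, true, t) := by
          cases g <;> simp [part2Step]
        rw [List.foldl_cons, hstep, show cleanGo ('!' :: rest) false = cleanGo rest true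
          from by simp [cleanGo]]
        exact ih true g t
      · rw [show cleanGo (c :: rest) false = c :: cleanGo rest false
          from by simp [cleanGo, hb]]
        cases g with
        | true =>
          by_cases hgt : c = '>'
          · subst hgt
            rw [List.foldl_cons, show part2Step (true, false, t) '>' = (false, false, t)
                from by simp [part2Step],
              show sGo ('>' :: cleanGo rest false) true t = sGo (cleanGo rest false) false t
                from by simp [sGo]]
            exact ih false false t
          · rw [List.foldl_cons, show part2Step (true, false, t) c = (true, false, t + 1)
                from by simp [part2Step, hb, hgt],
              show sGo (c :: cleanGo rest false) true t = sGo (cleanGo rest false) true (t + 1)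
                from by simp [sGo, hgt]]
            exact ih false true (t + 1)
        | false =>
          by_cases hlt : c = '<'
          · subst hlt
            rw [List.foldl_cons, show part2Step (false, false, t) '<' = (true, false, t)
                from by simp [part2Step],
              show sGo ('<' :: cleanGo rest false) false t = sGo (cleanGo rest false) true t
                from by simp [sGo]]
            exact ih false true t
          · rw [List.foldl_cons, show part2Step (false, false, t) c = (false, false, t)
                from by simp [part2Step, hb, hlt],
              show sGo (c :: cleanGo rest false) false t = sGo (cleanGo rest false) false t
                from by simp [sGo, hlt]]
            exact ih false false t

-- ===== VERDICT (by name: the statement is the Claim_ definition above) =====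
theorem part2_spec : Claim_equal_part2 := by
  intro stream _
  unfold Spec_part2 part2 part2_alt
  rw [part2_clean, sGo_eval, List.drop_one]
  have hne := pySplitLt_ne_nil (cleanGo stream.toList false)
  cases h : pySplitLt (cleanGo stream.toList false) with
  | nil => exact absurd h hne
  | cons ch tl => simp [evalChunks]
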